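-- pv_equiv track=rewrite | github.com/heewon0107/Algorithm | 프로그래머스/3/12987. 숫자 게임/숫자 게임.py | solution
-- ===== SOURCE A (Python) =====
-- def solution(A, B):
--     b_score = 0
--     A.sort()
--     B.sort()
--     a_idx = 0
--     b_idx = 0
--
--     while b_idx < len(B):
--         if A[a_idx] < B[b_idx]:
--             b_score += 1
--             a_idx += 1
--         b_idx += 1
--
--     return b_score
-- ===== SOURCE B (Python) =====
-- def solution(A, B):
--     A.sort()
--     B.sort()
--     wins = 0
--     for b in B:
--         # binary search: number of A cards strictly below b
--         lo, hi = 0, len(A)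
--         while lo < hi:
--             mid = (lo + hi) // 2
--             if A[mid] < b:
--                 lo = mid + 1
--             else:
--                 hi = mid
--         if wins < lo:
--             wins += 1
--     return wins
-- ===== Notes on version B (the rewrite author's own statement) =====
-- stated objective: alternative
-- what changed: A maintains a pointer into sorted A that advances on each win and compares A[pointer] to each b; B keeps no pointer: walking B in ascending order, b scores iff the current win count is below the number of A cards smaller than b, computed by a hand-written binary search over sorted A.
-- outside the precondition, e.g. on solution([5], [1, 2]): A returns 0, B returns 0; on solution([1], [2, 3]): A raises IndexError, B returns 1
import Mathlib
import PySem

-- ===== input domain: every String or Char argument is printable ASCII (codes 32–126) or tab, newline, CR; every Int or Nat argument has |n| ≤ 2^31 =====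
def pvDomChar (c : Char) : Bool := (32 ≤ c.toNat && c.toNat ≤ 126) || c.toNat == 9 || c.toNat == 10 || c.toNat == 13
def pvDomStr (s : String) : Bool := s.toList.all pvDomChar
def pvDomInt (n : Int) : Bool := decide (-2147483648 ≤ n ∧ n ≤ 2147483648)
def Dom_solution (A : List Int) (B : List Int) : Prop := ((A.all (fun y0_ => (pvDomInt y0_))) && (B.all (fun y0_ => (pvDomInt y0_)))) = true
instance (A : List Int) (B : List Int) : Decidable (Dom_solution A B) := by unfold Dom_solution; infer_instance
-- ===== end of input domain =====

-- B drops A's advancing pointer into sorted A entirely: walking B in ascending order,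
-- b scores iff the current win count is below the number of A cards smaller than b,
-- computed by a hand-written binary search over sorted A (objective: alternative).
-- Both programs sort their arguments in place; B performs the same in-place sorts as A,
-- and the equivalence proved is about the return value.

-- ===== PORT A =====
-- while b_idx < len(B): if A[a_idx] < B[b_idx]: b_score += 1; a_idx += 1 ; b_idx += 1
-- (the loop over b_idx is the structural recursion over the sorted B list; A[a_idx] via pyGet?,
--  in range on every admitted input since a_idx ≤ b_idx < len(B) ≤ len(A) under Pre_)
def solLoopA (As : List Int) : List Int → Int → Int → Int
  | [], _, b_score => b_score
  | b :: bs, a_idx, b_score =>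
    if (PySem.List.pyGet? As a_idx).getD 0 < b then
      solLoopA As bs (a_idx + 1) (b_score + 1)
    else
      solLoopA As bs a_idx b_score

def solution (A : List Int) (B : List Int) : Int :=
  let As := PySem.List.sorted A (fun x => x) false
  let Bs := PySem.List.sorted B (fun x => x) false
  solLoopA As Bs 0 0

-- ===== PORT B =====
-- while lo < hi: mid = (lo + hi) // 2; if A[mid] < b: lo = mid + 1 else: hi = mid
-- (Source B's hand-written bisect_left: the number of A cards strictly below b; mid is inlined)
def cntBelow (As : List Int) (b : Int) (lo hi : Int) : Int :=
  if lo < hi then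
    if (PySem.List.pyGet? As (PySem.Int.floordiv (lo + hi) 2)).getD 0 < b then
      cntBelow As b (PySem.Int.floordiv (lo + hi) 2 + 1) hi
    else
      cntBelow As b lo (PySem.Int.floordiv (lo + hi) 2)
  else lo
termination_by (hi - lo).toNat
decreasing_by
  all_goals
    simp only [PySem.Int.floordiv_eq_ediv_of_pos (by norm_num : (0:Int) < 2)] at *
  all_goals omega

-- for b in B: lo, hi = 0, len(A); <binary search>; if wins < lo: wins += 1
def solution_alt (A : List Int) (B : List Int) : Int :=
  let As := PySem.List.sorted A (fun x => x) false
  let Bs := PySem.List.sorted B (fun x => x) false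
  Bs.foldl (fun wins b => if wins < cntBelow As b 0 (PySem.List.len As) then wins + 1 else wins) 0

-- ===== PRECONDITION & SPEC =====
-- Pre_ excludes inputs where B is longer than A: there A's pointer can run past the end of A
-- and raise IndexError (the problem's contract gives both players the same number of cards);
-- on such inputs where A happens to return, B returns the same value, but they lie outside
-- the claim.
def Pre_solution (A : List Int) (B : List Int) : Prop := B.length ≤ A.length
instance (A : List Int) (B : List Int) : Decidable (Pre_solution A B) := by unfold Pre_solution; infer_instance

def pvWitness_solution : List Int × List Int := ([5, 1, 3], [2, 4, 3])

def Spec_solution (A : List Int) (B : List Int) (out : Int) : Prop := out = solution_alt A B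
instance (A : List Int) (B : List Int) (out : Int) : Decidable (Spec_solution A B out) := by unfold Spec_solution; infer_instance

-- ===== CLAIM (what is proved, stated in full; the proofs are below) =====
def Claim_equal_solution : Prop := ∀ (A : List Int) (B : List Int), Dom_solution A B → Pre_solution A B → Spec_solution A B (solution A B)

-- ===== LEMMAS AND PROOFS =====

-- In a sorted list, the element at index w is below b exactly when more than w elements are below b.
lemma sorted_getElem_lt_iff_countP (As : List Int) (hs : As.Pairwise (· ≤ ·))
    (w : Nat) (hw : w < As.length) (b : Int) :
    As[w] < b ↔ w < As.countP (· < b) := by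
  have hpg := List.pairwise_iff_getElem.mp hs
  constructor
  · intro hlt
    have hdecomp : As.countP (· < b) =
        (As.take (w + 1)).countP (· < b) + (As.drop (w + 1)).countP (· < b) := by
      rw [← List.countP_append, List.take_append_drop]
    have htake : (As.take (w + 1)).countP (· < b) = w + 1 := by
      rw [List.countP_eq_length.mpr, List.length_take]
      · omega
      · intro a ha
        obtain ⟨i, hi, hget⟩ := List.getElem_of_mem ha
        have hi' : i < w + 1 := by simp [List.length_take] at hi; omega
        have hgi : (As.take (w + 1))[i] = As[i] := List.getElem_take
        rcases Nat.lt_or_ge i w with h | h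
        · have := hpg i w (by omega) hw h
          subst hget; rw [hgi]; simp; omega
        · have : i = w := by omega
          subst this hget; rw [hgi]; simp [hlt]
    omega
  · intro hc
    by_contra hnb
    rw [Int.not_lt] at hnb
    have hdecomp : As.countP (· < b) =
        (As.take w).countP (· < b) + (As.drop w).countP (· < b) := by
      rw [← List.countP_append, List.take_append_drop]
    have hdrop : (As.drop w).countP (· < b) = 0 := by
      rw [List.countP_eq_zero]
      intro a ha
      obtain ⟨i, hi, hget⟩ := List.getElem_of_mem ha
      have hi' : w + i < As.length := by simp [List.length_drop] at hi; omega
      have hget' : a = As[w + i]'hi' := by rw [← hget, List.getElem_drop]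
      have hle : As[w] ≤ As[w + i]'hi' := by
        rcases Nat.eq_zero_or_pos i with h0 | h0
        · subst h0; simp
        · exact hpg w (w + i) hw hi' (by omega)
      simp only [decide_eq_true_eq]
      omega
    have htake : (As.take w).countP (· < b) ≤ w := by
      calc (As.take w).countP (· < b) ≤ (As.take w).length := List.countP_le_length
        _ ≤ w := by simp [List.length_take]
    omega

-- Source B's binary search, started on bounds enclosing the count, returns exactly
-- the number of elements of the sorted list that are strictly below b.
lemma cntBelow_eq_countP (As : List Int) (hs : As.Pairwise (· ≤ ·)) (b : Int) :
    ∀ (n : Nat) (lo hi : Int), (hi - lo).toNat ≤ n → 0 ≤ lo → hi ≤ As.length →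
    lo ≤ (As.countP (· < b) : Int) → (As.countP (· < b) : Int) ≤ hi →
    cntBelow As b lo hi = (As.countP (· < b) : Int) := by
  intro n
  induction n with
  | zero =>
    intro lo hi hn _ _ hlc hch
    rw [cntBelow, if_neg (by omega)]
    omega
  | succ n ih =>
    intro lo hi hn h0 hhi hlc hch
    rw [cntBelow]
    by_cases hlh : lo < hi
    · rw [if_pos hlh]
      have hfd : PySem.Int.floordiv (lo + hi) 2 = (lo + hi) / 2 :=
        PySem.Int.floordiv_eq_ediv_of_pos (by norm_num)
      have hmid : lo ≤ PySem.Int.floordiv (lo + hi) 2 ∧ PySem.Int.floordiv (lo + hi) 2 < hi := by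
        rw [hfd]; omega
      obtain ⟨hm1, hm2⟩ := hmid
      have hmn : (PySem.Int.floordiv (lo + hi) 2).toNat < As.length := by omega
      have hget : (PySem.List.pyGet? As (PySem.Int.floordiv (lo + hi) 2)).getD 0
          = As[(PySem.Int.floordiv (lo + hi) 2).toNat] := by
        have hnn : (0:Int) ≤ PySem.Int.floordiv (lo + hi) 2 := by omega
        rw [PySem.List.pyGet?_of_nonneg As hnn, List.getElem?_eq_getElem hmn, Option.getD_some]
      have hiff := sorted_getElem_lt_iff_countP As hs (PySem.Int.floordiv (lo + hi) 2).toNat hmn b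
      rw [hget]
      by_cases hc : As[(PySem.Int.floordiv (lo + hi) 2).toNat] < b
      · rw [if_pos hc]
        have hcnt : (PySem.Int.floordiv (lo + hi) 2).toNat < As.countP (· < b) := hiff.mp hc
        exact ih (PySem.Int.floordiv (lo + hi) 2 + 1) hi (by rw [hfd] at hm1 hm2 ⊢; omega)
          (by omega) hhi (by omega) hch
      · rw [if_neg hc]
        have hcnt : As.countP (· < b) ≤ (PySem.Int.floordiv (lo + hi) 2).toNat := by
          by_contra hx
          exact hc (hiff.mpr (by omega))
        exact ih lo (PySem.Int.floordiv (lo + hi) 2) (by rw [hfd] at hm1 hm2 ⊢; omega)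
          h0 (by omega) hlc (by omega)
    · rw [if_neg hlh]
      omega

-- A's pointer loop, with the invariant a_idx = b_score = w, equals B's pointer-free fold.
lemma solLoopA_eq_fold (As : List Int) (hs : As.Pairwise (· ≤ ·)) :
    ∀ (bs : List Int) (w : Nat), w + bs.length ≤ As.length →
    solLoopA As bs (w : Int) (w : Int) =
      bs.foldl (fun wins b => if wins < cntBelow As b 0 (PySem.List.len As) then wins + 1 else wins) (w : Int) := by
  intro bs
  induction bs with
  | nil => intro w _; simp [solLoopA]
  | cons b bs ih =>
    intro w hw
    have hwlt : w < As.length := by simp at hw; omega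
    have hget : (PySem.List.pyGet? As (w : Int)).getD 0 = As[w] := by
      simp [PySem.List.pyGet?_natCast, List.getElem?_eq_getElem hwlt]
    have hcnt : cntBelow As b 0 (PySem.List.len As) = (As.countP (· < b) : Int) := by
      apply cntBelow_eq_countP As hs b (PySem.List.len As).toNat 0 (PySem.List.len As)
      · omega
      · omega
      · simp [PySem.List.len_eq]
      · simp
      · simp only [PySem.List.len_eq]
        exact_mod_cast List.countP_le_length
    have hiff : (As[w] < b) ↔ ((w : Int) < cntBelow As b 0 (PySem.List.len As)) := by
      rw [hcnt]
      constructor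
      · intro h
        have := (sorted_getElem_lt_iff_countP As hs w hwlt b).mp h
        exact_mod_cast this
      · intro h
        exact (sorted_getElem_lt_iff_countP As hs w hwlt b).mpr (by exact_mod_cast h)
    simp only [solLoopA, hget, List.foldl_cons]
    by_cases hb : As[w] < b
    · rw [if_pos hb, if_pos (hiff.mp hb)]
      have hcast : ((w : Int) + 1) = ((w + 1 : Nat) : Int) := by push_cast; ring
      rw [show solLoopA As bs ((w : Int) + 1) ((w : Int) + 1)
            = solLoopA As bs ((w + 1 : Nat) : Int) ((w + 1 : Nat) : Int) from by rw [hcast],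
          ih (w + 1) (by simp at hw ⊢; omega), hcast]
    · rw [if_neg hb, if_neg (fun hc => hb (hiff.mpr hc))]
      exact ih w (by simp at hw ⊢; omega)

-- ===== VERDICT (by name: the statement is the Claim_ definition above) =====
theorem solution_spec : Claim_equal_solution := by
  unfold Claim_equal_solution
  intro A B _ hpre
  unfold Spec_solution solution solution_alt Pre_solution at *
  set As := PySem.List.sorted A (fun x => x) false with hAs
  set Bs := PySem.List.sorted B (fun x => x) false with hBs
  have hlenA : As.length = A.length := PySem.List.length_sorted A (fun x => x) false
  have hlenB : Bs.length = B.length := PySem.List.length_sorted B (fun x => x) false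
  have hpa : As.Pairwise (· ≤ ·) := by
    simpa using PySem.List.sorted_pairwise A (fun x => x)
  have := solLoopA_eq_fold As hpa Bs 0 (by omega)
  simpa using this
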